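-- pv_equiv track=rewrite | github.com/nastisha9/LFPC_labs | Lab4/CFG2CNF.py | eliminate_inaccessible_symb
-- ===== SOURCE A (Python) =====
-- def eliminate_inaccessible_symb(map):
--     production = map.copy()
--     accessed_keys = set()
--
--     for key, value in production.items():
--         for i in value:
--             for symbol in i:
--                 # fint the accesses nonterms
--                 if symbol in production:
--                     accessed_keys.add(symbol)
--
--     # find and delete the inaccess symbl
--     for key in list(production):
--         if key not in accessed_keys:
--             del production[key]
--     return production
-- ===== SOURCE B (Python) =====
-- def eliminate_inaccessible_symb(map):
--     return {key: value for key, value in map.items()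
--             if any(key in prod for rhs in map.values() for prod in rhs)}
-- ===== Notes on version B (the rewrite author's own statement) =====
-- stated objective: simpler
-- what changed: Replaces A's two-phase build-accessed-set-then-delete dict mutation with a single dict comprehension that keeps each key iff it occurs in some right-hand side, scanning the productions per key.
import Mathlib
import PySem

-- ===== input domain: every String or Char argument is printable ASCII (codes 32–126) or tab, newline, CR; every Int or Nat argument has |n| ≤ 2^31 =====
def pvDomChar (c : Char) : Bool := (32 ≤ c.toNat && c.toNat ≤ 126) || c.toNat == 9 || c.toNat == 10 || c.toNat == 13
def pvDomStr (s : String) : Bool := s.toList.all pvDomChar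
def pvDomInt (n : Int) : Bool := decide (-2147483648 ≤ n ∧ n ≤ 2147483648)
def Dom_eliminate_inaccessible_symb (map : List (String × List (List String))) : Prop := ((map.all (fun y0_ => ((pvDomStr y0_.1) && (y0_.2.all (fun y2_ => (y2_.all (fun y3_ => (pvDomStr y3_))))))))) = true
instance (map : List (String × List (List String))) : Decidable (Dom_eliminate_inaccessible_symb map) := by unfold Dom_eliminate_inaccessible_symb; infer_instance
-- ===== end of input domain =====

-- B replaces A's build-accessed-set-then-delete mutation with one filtering pass that
-- keeps each key iff it occurs on some right-hand side (objective: simpler).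

-- ===== PORT A =====
def eliminate_inaccessible_symb (map : List (String × List (List String))) : List (String × List (List String)) :=
  let production := map
  let accessed_keys : PySem.Set String :=
    production.foldl (fun acc kv =>
      kv.2.foldl (fun acc i =>
        i.foldl (fun acc symbol =>
          if production.any (fun p => p.1 == symbol) then PySem.Set.add acc symbol else acc)
          acc) acc)
      PySem.Set.empty
  production.filter (fun kv => PySem.Set.contains accessed_keys kv.1)

-- ===== PORT B =====
def eliminate_inaccessible_symb_alt (map : List (String × List (List String))) : List (String × List (List String)) :=
  map.filter (fun kv => map.any (fun rhs => rhs.2.any (fun prod => prod.contains kv.1)))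

-- ===== PRECONDITION & SPEC =====
def Spec_eliminate_inaccessible_symb (map : List (String × List (List String))) (out : List (String × List (List String))) : Prop := out = eliminate_inaccessible_symb_alt map
instance (map : List (String × List (List String))) (out : List (String × List (List String))) : Decidable (Spec_eliminate_inaccessible_symb map out) := by unfold Spec_eliminate_inaccessible_symb; infer_instance

-- ===== CLAIM (what is proved, stated in full; the proofs are below) =====
def Claim_equal_eliminate_inaccessible_symb : Prop := ∀ (map : List (String × List (List String))), Dom_eliminate_inaccessible_symb map → Spec_eliminate_inaccessible_symb map (eliminate_inaccessible_symb map)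

-- ===== LEMMAS AND PROOFS =====

-- innermost loop: fold over one production, adding each symbol satisfying P
theorem mem_fold_inner (P : String → Bool) (i : List String) (acc : PySem.Set String) (x : String) :
    x ∈ i.foldl (fun acc s => if P s then PySem.Set.add acc s else acc) acc ↔
      x ∈ acc ∨ (P x = true ∧ i.contains x = true) := by
  induction i generalizing acc with
  | nil => simp
  | cons s rest ih =>
    simp only [List.foldl_cons, ih]
    by_cases hp : P s
    · simp only [hp, if_pos, PySem.Set.mem_add]
      constructor
      · rintro (⟨h | rfl⟩ | ⟨hx, hr⟩)
        · exact Or.inl h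
        · exact Or.inr ⟨hp, by simp⟩
        · exact Or.inr ⟨hx, by simp only [List.contains_cons, hr, Bool.or_true]⟩
      · rintro (h | ⟨hx, hr⟩)
        · exact Or.inl (Or.inl h)
        · rcases (by simpa using hr : x = s ∨ rest.contains x = true) with rfl | hr
          · exact Or.inl (Or.inr rfl)
          · exact Or.inr ⟨hx, hr⟩
    · simp only [hp, if_neg, Bool.false_eq_true, not_false_iff]
      constructor
      · rintro (h | ⟨hx, hr⟩)
        · exact Or.inl h
        · exact Or.inr ⟨hx, by simp only [List.contains_cons, hr, Bool.or_true]⟩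
      · rintro (h | ⟨hx, hr⟩)
        · exact Or.inl h
        · rcases (by simpa using hr : x = s ∨ rest.contains x = true) with rfl | hr
          · simp [hx] at hp
          · exact Or.inr ⟨hx, hr⟩

-- middle loop: fold over the list of productions of one key
theorem mem_fold_mid (P : String → Bool) (v : List (List String)) (acc : PySem.Set String) (x : String) :
    x ∈ v.foldl (fun acc i => i.foldl (fun acc s => if P s then PySem.Set.add acc s else acc) acc) acc ↔
      x ∈ acc ∨ (P x = true ∧ v.any (fun i => i.contains x) = true) := by
  induction v generalizing acc with
  | nil => simp
  | cons i rest ih =>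
    simp only [List.foldl_cons, ih, mem_fold_inner, List.any_cons, Bool.or_eq_true]
    tauto

-- outer loop: fold over all (key, value) pairs
theorem mem_fold_outer (P : String → Bool) (L : List (String × List (List String)))
    (acc : PySem.Set String) (x : String) :
    x ∈ L.foldl (fun acc kv =>
        kv.2.foldl (fun acc i =>
          i.foldl (fun acc s => if P s then PySem.Set.add acc s else acc) acc) acc) acc ↔
      x ∈ acc ∨ (P x = true ∧ L.any (fun kv => kv.2.any (fun i => i.contains x)) = true) := by
  induction L generalizing acc with
  | nil => simp
  | cons kv rest ih =>
    simp only [List.foldl_cons, ih, mem_fold_mid, List.any_cons, Bool.or_eq_true]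
    tauto

-- ===== VERDICT (by name: the statement is the Claim_ definition above) =====
theorem eliminate_inaccessible_symb_spec : Claim_equal_eliminate_inaccessible_symb := by
  intro map _
  show eliminate_inaccessible_symb map = eliminate_inaccessible_symb_alt map
  unfold eliminate_inaccessible_symb eliminate_inaccessible_symb_alt
  apply List.filter_congr
  intro kv hkv
  have hkey : map.any (fun p => p.1 == kv.1) = true := by
    exact List.any_eq_true.mpr ⟨kv, hkv, by simp⟩
  simp only [PySem.Set.contains]
  rw [Bool.eq_iff_iff, List.contains_iff_mem, mem_fold_outer]
  simp [hkey]
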